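-- pv_equiv track=rewrite | github.com/Idansss/Ghost-Bot | app/services/news.py | _heuristic_summary
-- ===== SOURCE A (Python) =====
-- def _heuristic_summary(stories: list[dict], topic: str | None, mode: str) -> str:
--     topic_name = (topic or ("openai" if mode == "openai" else "crypto")).upper()
--     themes = []
--     if any("etf" in s["title"].lower() for s in stories):
--         themes.append("ETF flow is still steering sentiment")
--     if any(k in s["title"].lower() for s in stories for k in ("fed", "cpi", "inflation", "fomc", "rates")):
--         themes.append("Macro prints remain the volatility trigger")
--     if any(k in s["title"].lower() for s in stories for k in ("hack", "exploit", "breach")):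
--         themes.append("Security headlines are lifting risk premium")
--     if not themes:
--         themes.append("Tape is headline-driven, stay selective")
--     return f"{topic_name} brief: {' | '.join(themes[:2])}."
-- ===== SOURCE B (Python) =====
-- def _heuristic_summary(stories: list[dict], topic: str | None, mode: str) -> str:
--     topic_name = (topic or ("openai" if mode == "openai" else "crypto")).upper()
--     etf = macro = sec = False
--     for s in stories:
--         t = s["title"].lower()
--         etf = etf or "etf" in t
--         macro = macro or any(k in t for k in ("fed", "cpi", "inflation", "fomc", "rates"))
--         sec = sec or any(k in t for k in ("hack", "exploit", "breach"))
--         if etf and macro and sec: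
--             break
--     themes = [name for flag, name in (
--         (etf, "ETF flow is still steering sentiment"),
--         (macro, "Macro prints remain the volatility trigger"),
--         (sec, "Security headlines are lifting risk premium"),
--     ) if flag][:2] or ["Tape is headline-driven, stay selective"]
--     return f"{topic_name} brief: {' | '.join(themes)}."
-- ===== Notes on version B (the rewrite author's own statement) =====
-- stated objective: alternative
-- what changed: Replaces the three independent any()-scans over stories (each re-lowercasing every title) with a single pass that lowercases each title once, accumulates three boolean flags and breaks once all are set, then assembles the theme list from the flags in the fixed order.
import Mathlib
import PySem

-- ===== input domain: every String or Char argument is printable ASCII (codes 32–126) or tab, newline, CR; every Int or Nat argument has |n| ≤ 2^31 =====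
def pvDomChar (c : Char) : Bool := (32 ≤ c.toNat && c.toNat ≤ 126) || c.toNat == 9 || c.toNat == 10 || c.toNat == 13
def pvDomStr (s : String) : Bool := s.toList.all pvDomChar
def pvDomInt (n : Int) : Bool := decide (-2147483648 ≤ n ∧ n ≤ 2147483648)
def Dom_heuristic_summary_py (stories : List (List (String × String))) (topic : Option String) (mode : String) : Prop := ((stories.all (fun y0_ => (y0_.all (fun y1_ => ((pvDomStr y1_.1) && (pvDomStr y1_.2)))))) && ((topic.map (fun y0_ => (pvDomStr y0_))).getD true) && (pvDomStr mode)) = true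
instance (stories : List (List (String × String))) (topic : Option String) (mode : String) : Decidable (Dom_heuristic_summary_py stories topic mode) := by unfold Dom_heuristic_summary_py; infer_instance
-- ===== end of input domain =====

-- B replaces A's three independent any()-scans by one pass over the stories with three
-- boolean flags and an early break; same return value on Pre_ (objective: alternative).


-- shared by both ports (same Python line in A and B): (topic or ("openai" if mode == "openai" else "crypto")).upper()
def pvTopicName (topic : Option String) (mode : String) : String :=
  PySem.Str.upper (match topic with
    | some t => if t == "" then (if mode == "openai" then "openai" else "crypto") else t
    | none => if mode == "openai" then "openai" else "crypto")

-- s["title"]: a missing key is a KeyError in Python, excluded by Pre_; getD "" only totalises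
def pvTitle (s : List (String × String)) : String :=
  ((PySem.Dict.mk s).get? "title").getD ""

-- ===== PORT A =====
def heuristic_summary_py (stories : List (List (String × String))) (topic : Option String) (mode : String) : String :=
  let topic_name := pvTopicName topic mode
  let themes : List String := []
  let themes := if stories.any (fun s => PySem.Str.isIn "etf" (PySem.Str.lower (pvTitle s)))
    then themes ++ ["ETF flow is still steering sentiment"] else themes
  let themes := if stories.any (fun s => ["fed", "cpi", "inflation", "fomc", "rates"].any
      (fun k => PySem.Str.isIn k (PySem.Str.lower (pvTitle s))))
    then themes ++ ["Macro prints remain the volatility trigger"] else themes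
  let themes := if stories.any (fun s => ["hack", "exploit", "breach"].any
      (fun k => PySem.Str.isIn k (PySem.Str.lower (pvTitle s))))
    then themes ++ ["Security headlines are lifting risk premium"] else themes
  let themes := if themes.isEmpty then themes ++ ["Tape is headline-driven, stay selective"] else themes
  topic_name ++ " brief: " ++ PySem.Str.join " | " (themes.take 2) ++ "."

-- ===== PORT B =====
-- the single flag-accumulating loop of Source B, with the early break once all three flags are set
def pvFlagLoop (stories : List (List (String × String))) (etf mac sec : Bool) : Bool × Bool × Bool :=
  match stories with
  | [] => (etf, mac, sec)
  | s :: rest =>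
    let t := PySem.Str.lower (pvTitle s)
    let etf := etf || PySem.Str.isIn "etf" t
    let mac := mac || ["fed", "cpi", "inflation", "fomc", "rates"].any (fun k => PySem.Str.isIn k t)
    let sec := sec || ["hack", "exploit", "breach"].any (fun k => PySem.Str.isIn k t)
    if etf && mac && sec then (etf, mac, sec) else pvFlagLoop rest etf mac sec

def heuristic_summary_py_alt (stories : List (List (String × String))) (topic : Option String) (mode : String) : String :=
  let topic_name := pvTopicName topic mode
  let flags := pvFlagLoop stories false false false
  let themes :=
    ((if flags.1 then ["ETF flow is still steering sentiment"] else []) ++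
     (if flags.2.1 then ["Macro prints remain the volatility trigger"] else []) ++
     (if flags.2.2 then ["Security headlines are lifting risk premium"] else [])).take 2
  let themes := if themes == [] then ["Tape is headline-driven, stay selective"] else themes
  topic_name ++ " brief: " ++ PySem.Str.join " | " themes ++ "."

-- ===== PRECONDITION & SPEC =====
-- Pre_ excludes story lists containing a dict without a "title" key: there Python A raises
-- KeyError unless every keyword group already matched earlier in the list (an accident of
-- any()'s short-circuiting), so no value of A is specified on such inputs.
def Pre_heuristic_summary_py (stories : List (List (String × String))) (topic : Option String) (mode : String) : Prop :=
  stories.all (fun s => (PySem.Dict.mk s).contains "title") = true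
instance (stories : List (List (String × String))) (topic : Option String) (mode : String) : Decidable (Pre_heuristic_summary_py stories topic mode) := by unfold Pre_heuristic_summary_py; infer_instance

def pvWitness_heuristic_summary_py : (List (List (String × String))) × Option String × String :=
  ([[("title", "Etf inflow news")]], some "BTC", "news")

def Spec_heuristic_summary_py (stories : List (List (String × String))) (topic : Option String) (mode : String) (out : String) : Prop := out = heuristic_summary_py_alt stories topic mode
instance (stories : List (List (String × String))) (topic : Option String) (mode : String) (out : String) : Decidable (Spec_heuristic_summary_py stories topic mode out) := by unfold Spec_heuristic_summary_py; infer_instance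

-- ===== CLAIM (what is proved, stated in full; the proofs are below) =====
def Claim_equal_heuristic_summary_py : Prop := ∀ (stories : List (List (String × String))) (topic : Option String) (mode : String), Dom_heuristic_summary_py stories topic mode → Pre_heuristic_summary_py stories topic mode → Spec_heuristic_summary_py stories topic mode (heuristic_summary_py stories topic mode)

-- ===== LEMMAS AND PROOFS =====

theorem pvOrTrue {x y z : Bool} (h : (x || y) = true) : (x || y) = (x || (y || z)) := by
  cases x <;> cases y <;> simp_all

-- the early-exit flag loop computes exactly the three whole-list any()'s of A
theorem pvFlagLoop_eq (stories : List (List (String × String))) (e m s : Bool) :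
    pvFlagLoop stories e m s =
      (e || stories.any (fun x => PySem.Str.isIn "etf" (PySem.Str.lower (pvTitle x))),
       m || stories.any (fun x => ["fed", "cpi", "inflation", "fomc", "rates"].any
              (fun k => PySem.Str.isIn k (PySem.Str.lower (pvTitle x)))),
       s || stories.any (fun x => ["hack", "exploit", "breach"].any
              (fun k => PySem.Str.isIn k (PySem.Str.lower (pvTitle x))))) := by
  induction stories generalizing e m s with
  | nil => simp [pvFlagLoop]
  | cons hd tl ih =>
    simp only [pvFlagLoop, List.any_cons]
    split
    · rename_i h
      simp only [Bool.and_eq_true] at h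
      obtain ⟨⟨h1, h2⟩, h3⟩ := h
      rw [Prod.mk.injEq, Prod.mk.injEq]
      exact ⟨pvOrTrue h1, pvOrTrue h2, pvOrTrue h3⟩
    · rw [ih]
      simp [Bool.or_assoc]

-- ===== VERDICT (by name: the statement is the Claim_ definition above) =====

theorem heuristic_summary_py_spec : Claim_equal_heuristic_summary_py := by
  intro stories topic mode _ _
  unfold Spec_heuristic_summary_py heuristic_summary_py heuristic_summary_py_alt
  simp only [pvFlagLoop_eq, Bool.false_or]
  cases h1 : stories.any (fun x => PySem.Str.isIn "etf" (PySem.Str.lower (pvTitle x))) <;>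
  cases h2 : stories.any (fun x => ["fed", "cpi", "inflation", "fomc", "rates"].any
      (fun k => PySem.Str.isIn k (PySem.Str.lower (pvTitle x)))) <;>
  cases h3 : stories.any (fun x => ["hack", "exploit", "breach"].any
      (fun k => PySem.Str.isIn k (PySem.Str.lower (pvTitle x)))) <;>
  simp [List.take]
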